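-- pv_equiv track=rewrite | github.com/Raouf-Medj/tp-igl | backend/articleController.py | check_all_words_existence
-- ===== SOURCE A (Python) =====
-- import unicodedata
--
-- def normalize_string(s):
--     """
--     normalise string
--
--     This method modifies a string, deletes non-Ascii characters, and makes sure it returns a valid Unicode string
--
--     :param s: the string input "to normalize"
--     :type s: string
--     :return: a valid Unicode string
--     :rtype: string
--     """
--     return unicodedata.normalize('NFD', s).encode('ascii', 'ignore').decode('utf-8')
--
-- def check_all_words_existence(words, text_content):
--     """
--     check all words existence
--
--     this method checks wether at least one word "from the word list" exists in the text
--
--     :param words: the list of words that we check the existence in the text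
--     :type words: list
--     :param text_content: the full text in which we search the existence of the words
--     :type text_content: string
--     :return: Boolean saying wether one of the words exists in the text or not
--     :rtype: bool
--     """
--     normalized_text = normalize_string(text_content.lower())
--
--     normalized_words = []
--     for word in words:
--         if isinstance(word, str):
--             normalized_words.extend(normalize_string(word.lower()).split())
--         else:
--             normalized_words.append(normalize_string(word.lower()))
--
--     for word in normalized_words:
--         found = False
--         for text_word in normalized_text.split():
--             if word in text_word:
--                 found = True
--                 break
--         if not found:
--             return False
--
--     return True
-- ===== SOURCE B (Python) =====
-- import unicodedata
--
-- def normalize_string(s):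
--     return unicodedata.normalize('NFD', s).encode('ascii', 'ignore').decode('utf-8')
--
-- def check_all_words_existence(words, text_content):
--     normalized_text = normalize_string(text_content.lower())
--
--     normalized_words = []
--     for word in words:
--         if isinstance(word, str):
--             normalized_words.extend(normalize_string(word.lower()).split())
--         else:
--             normalized_words.append(normalize_string(word.lower()))
--
--     # Inverted matching via a substring index: sweep the text words once,
--     # keeping the shrinking set of still-unmatched target words; for each text
--     # word enumerate its substrings of exactly the lengths that occur among the
--     # targets and remove the matched ones by set difference.
--     remaining = set(normalized_words)
--     lengths = {len(w) for w in remaining}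
--     for tw in normalized_text.split():
--         if not remaining:
--             break
--         subs = {tw[i:i + l] for l in lengths if l <= len(tw)
--                 for i in range(len(tw) - l + 1)}
--         remaining -= subs
--     return not remaining
-- ===== Notes on version B (the rewrite author's own statement) =====
-- stated objective: alternative
-- what changed: B inverts the matching and uses a substring index: it sweeps the text words once, and for each text word builds the set of its substrings of exactly the lengths occurring among the target words, removing matched targets from a shrinking set by set difference (early exit when empty), instead of rescanning the text's words per target word.
import Mathlib
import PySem

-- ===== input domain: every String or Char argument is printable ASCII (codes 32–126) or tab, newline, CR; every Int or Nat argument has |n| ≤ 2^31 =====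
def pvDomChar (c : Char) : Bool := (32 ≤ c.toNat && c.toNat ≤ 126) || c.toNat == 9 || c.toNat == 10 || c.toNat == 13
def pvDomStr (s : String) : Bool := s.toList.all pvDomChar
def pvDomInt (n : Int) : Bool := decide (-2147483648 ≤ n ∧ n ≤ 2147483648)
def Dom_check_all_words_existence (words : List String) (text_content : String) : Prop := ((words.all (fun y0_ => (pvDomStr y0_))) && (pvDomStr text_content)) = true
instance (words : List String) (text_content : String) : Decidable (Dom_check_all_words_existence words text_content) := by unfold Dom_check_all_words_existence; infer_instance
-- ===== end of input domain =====

-- ===== PORT A =====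
-- B inverts the matching and uses a substring index: one sweep over the text words,
-- removing matched targets from a shrinking set via the set of each text word's substrings
-- of the target lengths (objective: alternative).
-- normalize_string: NFD-normalize then drop non-ASCII; on the ASCII domain Dom_ this is
-- the identity, so both ports transliterate it as the identity (exact on the stated domain).

-- inner loop of A: scan the text words for one containing `word` (with break)
def pvFindIn (word : String) (tws : List String) : Bool :=
  match tws with
  | [] => false
  | t :: rest => if PySem.Str.isIn word t then true else pvFindIn word rest

-- outer loop of A: early-return False on the first word not found
def pvAllFound (ws : List String) (normalized_text : String) : Bool :=
  match ws with
  | [] => true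
  | w :: rest =>
      if pvFindIn w (PySem.Str.split₀ normalized_text) then pvAllFound rest normalized_text
      else false

def check_all_words_existence (words : List String) (text_content : String) : Bool :=
  let normalized_text := PySem.Str.lower text_content
  let normalized_words :=
    words.foldl (fun acc word => acc ++ PySem.Str.split₀ (PySem.Str.lower word)) []
  pvAllFound normalized_words normalized_text

-- ===== PORT B =====
-- B's substring index for one text word: the set of tw's substrings whose length occurs
-- among the target words ({tw[i:i+l] for l in lengths if l <= len(tw) for i in range(...)})
def pvSubs (tw : String) (lengths : PySem.Set Int) : PySem.Set String :=
  PySem.Set.ofList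
    ((lengths.filter (fun l => l ≤ (PySem.Str.len tw : Int))).flatMap
      (fun l => (PySem.List.pyRange 0 ((PySem.Str.len tw : Int) - l + 1) 1).map
        (fun i => PySem.Str.slice tw (some i) (some (i + l)))))

-- B's sweep: over the text words, shrinking the set of unmatched target words by set
-- difference with the substring index; `if not remaining: break` is the empty test
def pvSweep (lengths : PySem.Set Int) (remaining : PySem.Set String) (tws : List String) : PySem.Set String :=
  match tws with
  | [] => remaining
  | t :: rest =>
      if remaining = [] then remaining
      else pvSweep lengths (remaining.filter (fun w => !((pvSubs t lengths).contains w))) rest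

def check_all_words_existence_alt (words : List String) (text_content : String) : Bool :=
  let normalized_text := PySem.Str.lower text_content
  let normalized_words :=
    words.foldl (fun acc word => acc ++ PySem.Str.split₀ (PySem.Str.lower word)) []
  let remaining := PySem.Set.ofList normalized_words
  let lengths := PySem.Set.ofList (remaining.map (fun w => (PySem.Str.len w : Int)))
  (pvSweep lengths remaining (PySem.Str.split₀ normalized_text)).isEmpty

-- ===== PRECONDITION & SPEC =====
def Spec_check_all_words_existence (words : List String) (text_content : String) (out : Bool) : Prop := out = check_all_words_existence_alt words text_content
instance (words : List String) (text_content : String) (out : Bool) : Decidable (Spec_check_all_words_existence words text_content out) := by unfold Spec_check_all_words_existence; infer_instance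

-- ===== CLAIM (what is proved, stated in full; the proofs are below) =====
def Claim_equal_check_all_words_existence : Prop := ∀ (words : List String) (text_content : String), Dom_check_all_words_existence words text_content → Spec_check_all_words_existence words text_content (check_all_words_existence words text_content)

-- ===== LEMMAS AND PROOFS =====

-- pvFindIn is List.any of the substring test
lemma pvFindIn_eq_any (w : String) (tws : List String) :
    pvFindIn w tws = tws.any (fun t => PySem.Str.isIn w t) := by
  induction tws with
  | nil => rfl
  | cons t rest ih =>
      rw [pvFindIn]
      split_ifs with h <;> simp only [PySem.Str.isIn_eq] at h <;>
        simp [List.any_cons, h, ih]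

-- pvAllFound is List.all of "some text word contains w"
lemma pvAllFound_eq_all (ws : List String) (text : String) :
    pvAllFound ws text
      = ws.all (fun w => (PySem.Str.split₀ text).any (fun t => PySem.Str.isIn w t)) := by
  induction ws with
  | nil => rfl
  | cons w rest ih =>
      rw [pvAllFound, pvFindIn_eq_any]
      split_ifs with h <;> simp only [PySem.Str.isIn_eq] at h <;>
        simp [List.all_cons, h, ih]

-- a word whose length occurs in `lengths` is in the substring index of tw iff it is a
-- substring of tw
lemma pvSubs_mem_iff (tw w : String) (lengths : List Int)
    (hw : ((PySem.Str.len w : Int)) ∈ lengths) :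
    w ∈ pvSubs tw lengths ↔ PySem.Chars.isIn w.toList tw.toList = true := by
  unfold pvSubs
  rw [PySem.Set.mem_ofList]
  simp only [List.mem_flatMap, List.mem_filter, List.mem_map, PySem.List.mem_pyRange_one,
    decide_eq_true_eq]
  constructor
  · rintro ⟨l, ⟨-, -⟩, i, ⟨-, -⟩, heq⟩
    subst heq
    rw [PySem.Chars.isIn_iff_infix, PySem.Str.toList_slice, PySem.Chars.slice_eq_listSlice]
    show List.take _ (List.drop _ _) <:+: _
    exact ((List.take_prefix _ _).isInfix).trans ((List.drop_suffix _ _).isInfix)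
  · intro h
    obtain ⟨j, hj⟩ := (PySem.Chars.exists_prefix_drop_iff_isIn _ _).mpr h
    have hn : w.toList.length ≤ tw.toList.length - j := by
      simpa using hj.length_le
    by_cases hz : w.toList.length = 0
    · refine ⟨PySem.Str.len w, ⟨hw, ?_⟩, ((0 : Nat) : Int), ⟨by omega, ?_⟩, ?_⟩
      · rw [PySem.Str.len_eq, PySem.Str.len_eq]; omega
      · rw [PySem.Str.len_eq, PySem.Str.len_eq, hz]; push_cast; omega
      · apply String.ext
        rw [PySem.Str.len_eq, PySem.Str.toList_slice, PySem.Chars.slice_eq_listSlice,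
          PySem.List.slice_natCast_add]
        rw [List.eq_nil_of_length_eq_zero hz]
        simp
    · refine ⟨PySem.Str.len w, ⟨hw, ?_⟩, ((j : Nat) : Int), ⟨by omega, ?_⟩, ?_⟩
      · rw [PySem.Str.len_eq, PySem.Str.len_eq]; omega
      · rw [PySem.Str.len_eq, PySem.Str.len_eq]; omega
      · apply String.ext
        rw [PySem.Str.len_eq, PySem.Str.toList_slice, PySem.Chars.slice_eq_listSlice,
          PySem.List.slice_natCast_add]
        exact (List.prefix_iff_eq_take.mp hj).symm

-- the sweep leaves exactly the words not contained in any text word, provided every word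
-- of `remaining` has its length in the precomputed `lengths` set
lemma pvSweep_eq_filter (tws : List String) (lengths : List Int) (remaining : List String)
    (H : ∀ w ∈ remaining, ((PySem.Str.len w : Int)) ∈ lengths) :
    pvSweep lengths remaining tws
      = remaining.filter (fun w => !(tws.any (fun t => PySem.Str.isIn w t))) := by
  induction tws generalizing remaining with
  | nil => simp [pvSweep]
  | cons t rest ih =>
      rw [pvSweep]
      split_ifs with h
      · subst h; simp
      · rw [ih (remaining.filter (fun w => !((pvSubs t lengths).contains w)))
              (fun w hw => H w (List.mem_filter.mp hw).1),
            List.filter_filter]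
        apply List.filter_congr
        intro w hw
        have hc := pvSubs_mem_iff t w lengths (H w hw)
        simp [List.any_cons, hc, Bool.not_or, Bool.and_comm]

theorem check_all_words_existence_spec : Claim_equal_check_all_words_existence := by
  intro words text _
  unfold Spec_check_all_words_existence check_all_words_existence check_all_words_existence_alt
  show pvAllFound _ _ = List.isEmpty (pvSweep _ _ _)
  rw [pvAllFound_eq_all,
      pvSweep_eq_filter _ _ _ (by
        intro w hw
        exact (PySem.Set.mem_ofList ..).mpr (List.mem_map_of_mem hw))]
  rw [Bool.eq_iff_iff]
  simp [List.all_eq_true, List.isEmpty_iff, List.filter_eq_nil_iff, PySem.Set.mem_ofList]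
  tauto
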